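-- pv_equiv track=rewrite | github.com/kwakminoo/AI-Guitar-Tab | backend/app/services/harmony.py | _estimate_capo
-- ===== SOURCE A (Python) =====
-- def _estimate_capo(root: int, mode: str) -> int:
--     friendly_major = [0, 7, 2, 9, 4]  # C G D A E
--     friendly_minor = [9, 4, 2]  # Am Em Dm
--     candidates = friendly_major if mode == "major" else friendly_minor
--
--     best = 0
--     for capo in range(0, 8):
--         shape_root = (root - capo) % 12
--         if shape_root in candidates:
--             best = capo
--             break
--     return best
-- ===== SOURCE B (Python) =====
-- def _estimate_capo(root: int, mode: str) -> int:
--     candidates = [0, 7, 2, 9, 4] if mode == "major" else [9, 4, 2]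
--     valid = [(root - c) % 12 for c in candidates if (root - c) % 12 < 8]
--     return min(valid) if valid else 0
-- ===== Notes on version B (the rewrite author's own statement) =====
-- stated objective: simpler
-- what changed: Instead of scanning capos 0..7 and testing shape-root membership, B computes for each friendly shape-root its required capo (root - c) % 12, keeps those below 8 and returns the minimum (0 if none).
import Mathlib
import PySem

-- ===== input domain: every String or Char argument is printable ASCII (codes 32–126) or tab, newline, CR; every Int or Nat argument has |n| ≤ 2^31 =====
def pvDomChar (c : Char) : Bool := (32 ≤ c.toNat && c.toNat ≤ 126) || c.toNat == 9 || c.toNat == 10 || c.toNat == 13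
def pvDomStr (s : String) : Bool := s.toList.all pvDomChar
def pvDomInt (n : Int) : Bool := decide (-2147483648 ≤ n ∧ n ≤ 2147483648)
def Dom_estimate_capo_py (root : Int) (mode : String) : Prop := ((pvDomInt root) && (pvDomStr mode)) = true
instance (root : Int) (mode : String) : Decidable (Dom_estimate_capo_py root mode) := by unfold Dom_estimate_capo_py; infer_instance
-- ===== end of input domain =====

-- B replaces A's scan over capos 0..7 with a direct computation: for each friendly
-- shape-root c the needed capo is (root - c) % 12; keep those < 8 and take the minimum
-- (objective: simpler, same exact result).

-- ===== PORT A =====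
-- the for-loop over range(0, 8) with break: first capo whose shape_root is friendly, else best = 0
def estimateCapoLoopA (root : Int) (candidates : List Int) : List Int → Int
  | [] => 0
  | capo :: rest =>
    if PySem.Int.mod (root - capo) 12 ∈ candidates then capo
    else estimateCapoLoopA root candidates rest

def estimate_capo_py (root : Int) (mode : String) : Int :=
  let friendly_major : List Int := [0, 7, 2, 9, 4]
  let friendly_minor : List Int := [9, 4, 2]
  let candidates := if mode == "major" then friendly_major else friendly_minor
  estimateCapoLoopA root candidates (PySem.List.pyRange 0 8 1)

-- ===== PORT B =====
def estimate_capo_py_alt (root : Int) (mode : String) : Int :=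
  let candidates : List Int := if mode == "major" then [0, 7, 2, 9, 4] else [9, 4, 2]
  let valid := (candidates.filter (fun c => PySem.Int.mod (root - c) 12 < 8)).map
      (fun c => PySem.Int.mod (root - c) 12)
  match PySem.List.min? valid (fun x => x) with
  | some m => m
  | none => 0

-- ===== PRECONDITION & SPEC =====
def Spec_estimate_capo_py (root : Int) (mode : String) (out : Int) : Prop := out = estimate_capo_py_alt root mode
instance (root : Int) (mode : String) (out : Int) : Decidable (Spec_estimate_capo_py root mode out) := by unfold Spec_estimate_capo_py; infer_instance

-- ===== CLAIM (what is proved, stated in full; the proofs are below) =====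
def Claim_equal_estimate_capo_py : Prop := ∀ (root : Int) (mode : String), Dom_estimate_capo_py root mode → Spec_estimate_capo_py root mode (estimate_capo_py root mode)

-- ===== LEMMAS AND PROOFS =====

-- both programs read root only through (root - c) % 12, which depends only on root % 12
theorem pv_mod_shift (root c : Int) :
    PySem.Int.mod (root - c) 12 = PySem.Int.mod (root % 12 - c) 12 := by
  rw [PySem.Int.mod_eq_emod_of_pos (by norm_num), PySem.Int.mod_eq_emod_of_pos (by norm_num)]
  omega

theorem pv_A_shift (root : Int) (mode : String) :
    estimate_capo_py root mode = estimate_capo_py (root % 12) mode := by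
  unfold estimate_capo_py
  have h : ∀ cands l, estimateCapoLoopA root cands l = estimateCapoLoopA (root % 12) cands l := by
    intro cands l
    induction l with
    | nil => rfl
    | cons capo rest ih =>
      simp only [estimateCapoLoopA, pv_mod_shift root, ih]
  simp only [h]

theorem pv_B_shift (root : Int) (mode : String) :
    estimate_capo_py_alt root mode = estimate_capo_py_alt (root % 12) mode := by
  unfold estimate_capo_py_alt
  simp only [pv_mod_shift root]

theorem pv_core (r : Int) (mode : String) (h0 : 0 ≤ r) (h1 : r < 12) :
    estimate_capo_py r mode = estimate_capo_py_alt r mode := by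
  by_cases hm : (mode == "major") = true
  · simp only [estimate_capo_py, estimate_capo_py_alt, hm, if_true]
    interval_cases r <;> decide
  · simp only [estimate_capo_py, estimate_capo_py_alt, hm, if_false, Bool.false_eq_true]
    interval_cases r <;> decide

-- ===== VERDICT (by name: the statement is the Claim_ definition above) =====
theorem estimate_capo_py_spec : Claim_equal_estimate_capo_py := by
  intro root mode _
  unfold Spec_estimate_capo_py
  rw [pv_A_shift, pv_B_shift]
  exact pv_core _ _ (Int.emod_nonneg _ (by norm_num)) (Int.emod_lt_of_pos _ (by norm_num))
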